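-- pv_equiv track=rewrite | github.com/dailythm/dailythm-GwonYeong | 2022/Nov/21(Wed)/3. 치킨 쿠폰.py | solution
-- ===== SOURCE A (Python) =====
-- def solution(chicken):
--     coupon = 0
--     service = 0
--     idx = 0
--     while chicken >= idx:
--         if coupon == 10:
--             service +=1
--             chicken +=1
--             coupon = 0
--         coupon +=1
--         idx+=1
--     return service
-- ===== SOURCE B (Python) =====
-- def solution(chicken):
--     # closed form: every 10th chicken earns a free one which itself yields a
--     # coupon, so frees = (chicken - 1) // 9 for positive chicken
--     return (chicken - 1) // 9 if chicken > 0 else 0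
-- ===== Notes on version B (the rewrite author's own statement) =====
-- stated objective: faster
-- what changed: Replaced the coupon-counting simulation loop with a closed-form floor-division formula (chicken-1)//9.
import Mathlib
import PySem

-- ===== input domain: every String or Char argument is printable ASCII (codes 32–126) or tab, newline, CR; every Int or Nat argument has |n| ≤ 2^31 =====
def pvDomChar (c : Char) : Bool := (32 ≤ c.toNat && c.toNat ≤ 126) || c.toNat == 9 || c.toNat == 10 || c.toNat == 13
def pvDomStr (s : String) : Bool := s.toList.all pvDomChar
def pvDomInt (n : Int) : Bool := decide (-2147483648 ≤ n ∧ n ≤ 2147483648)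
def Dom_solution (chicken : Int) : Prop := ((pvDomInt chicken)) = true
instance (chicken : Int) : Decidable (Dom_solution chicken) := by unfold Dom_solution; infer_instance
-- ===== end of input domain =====

-- B replaces A's O(n) coupon-counting simulation loop with a closed-form floor-division formula (faster).


-- ===== PORT A =====
-- the while loop of A, state (chicken, coupon, service, idx)
def solutionLoop (chicken coupon service idx : Int) : Int :=
  if _h : chicken ≥ idx then
    if coupon = 10 then solutionLoop (chicken + 1) 1 (service + 1) (idx + 1)
    else solutionLoop chicken (coupon + 1) service (idx + 1)
  else service
termination_by 11 * (chicken - idx + 1).toNat + coupon.toNat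
decreasing_by all_goals omega

def solution (chicken : Int) : Int := solutionLoop chicken 0 0 0

-- ===== PORT B =====
def solution_alt (chicken : Int) : Int :=
  if chicken > 0 then PySem.Int.floordiv (chicken - 1) 9 else 0

-- ===== PRECONDITION & SPEC =====
def Spec_solution (chicken : Int) (out : Int) : Prop := out = solution_alt chicken
instance (chicken : Int) (out : Int) : Decidable (Spec_solution chicken out) := by unfold Spec_solution; infer_instance

-- ===== CLAIM (what is proved, stated in full; the proofs are below) =====
def Claim_equal_solution : Prop := ∀ (chicken : Int), Dom_solution chicken → Spec_solution chicken (solution chicken)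

-- ===== LEMMAS AND PROOFS =====

-- number of services still to come from state with slack d = chicken - idx and current coupon c
def solutionExtra (d c : Int) : Int :=
  if d < 10 - c then 0 else (d - (10 - c)) / 9 + 1

theorem solutionLoop_eq (chicken coupon service idx : Int)
    (h0 : 0 ≤ coupon) (h10 : coupon ≤ 10) :
    solutionLoop chicken coupon service idx
      = service + solutionExtra (chicken - idx) coupon := by
  unfold solutionLoop
  split_ifs with hge hc
  · -- coupon = 10: one service, slack unchanged
    rw [solutionLoop_eq (chicken + 1) 1 (service + 1) (idx + 1) (by omega) (by omega)]
    subst hc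
    unfold solutionExtra
    split_ifs <;> omega
  · -- ordinary step: slack drops by one, coupon rises by one
    rw [solutionLoop_eq chicken (coupon + 1) service (idx + 1) (by omega) (by omega)]
    unfold solutionExtra
    split_ifs <;> omega
  · -- loop exit: slack negative, nothing more to come
    unfold solutionExtra
    split_ifs <;> omega
termination_by 11 * (chicken - idx + 1).toNat + coupon.toNat
decreasing_by all_goals omega

-- ===== VERDICT (by name: the statement is the Claim_ definition above) =====
theorem solution_spec : Claim_equal_solution := by
  intro chicken _
  unfold Spec_solution solution solution_alt
  rw [solutionLoop_eq chicken 0 0 0 (by omega) (by omega)]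
  unfold solutionExtra
  by_cases h : 0 < chicken
  · rw [if_pos h, PySem.Int.floordiv_eq_ediv_of_pos (by omega)]
    split_ifs <;> omega
  · rw [if_neg h]
    split_ifs <;> omega
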